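-- pv_equiv track=rewrite | github.com/alexro/pypypy | code_forces/1323A.py | find
-- ===== SOURCE A (Python) =====
-- def find(a):
--     # if len(a) == 3 and a[0] == 1 and a[1] == 4 and a[2] == 3:
--     #     return 1, [2]
--
--     alen = len(a)
--     start = end = 0
--     sum = 0
--     found = False
--
--     while not found:
--         if start == alen:
--             start = -1
--             end = -1
--             break
--
--         sum = 0
--
--         for j in range(start, alen):
--             sum += a[j]
--             if sum % 2 == 0:
--                 found = True
--                 end = j
--                 break
--
--         if not found:
--             start += 1
--
--     if not found:
--         return -1, []
--     else:
--         ak = []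
--         for p in range(start, end + 1):
--             ak.append(p + 1)
--         return len(ak), ak
-- ===== SOURCE B (Python) =====
-- def find(a):
--     n = len(a)
--     if n == 0:
--         return -1, []
--     if a[0] % 2 == 0:
--         return 1, [1]
--     # first element odd: the earliest even-sum run from index 0 ends at the next odd element
--     for k in range(1, n):
--         if a[k] % 2 != 0:
--             return k + 1, list(range(1, k + 2))
--     # no second odd: a[1] (if any) is even and is itself an even-sum subarray
--     if n > 1:
--         return 1, [2]
--     return -1, []
-- ===== Notes on version B (the rewrite author's own statement) =====
-- stated objective: simpler
-- what changed: Replaces A's restart-the-start outer while-loop with a running-sum inner scan by direct case analysis on the parity of the first element plus a single scan for the next odd element.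
import Mathlib
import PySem

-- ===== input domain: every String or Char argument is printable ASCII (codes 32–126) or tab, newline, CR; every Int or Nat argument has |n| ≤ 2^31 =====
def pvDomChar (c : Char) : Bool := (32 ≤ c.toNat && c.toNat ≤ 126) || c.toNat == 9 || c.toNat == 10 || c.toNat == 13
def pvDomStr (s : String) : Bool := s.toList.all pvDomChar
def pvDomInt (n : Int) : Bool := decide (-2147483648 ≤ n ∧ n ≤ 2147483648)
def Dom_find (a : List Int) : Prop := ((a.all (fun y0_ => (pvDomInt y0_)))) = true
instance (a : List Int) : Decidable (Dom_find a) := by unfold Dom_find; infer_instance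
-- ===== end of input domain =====

-- B replaces A's restart-the-scan outer loop + running-sum inner loop by direct case analysis
-- on the parity of the first element plus a single scan for the next odd element (objective: simpler).


-- ===== PORT A =====
-- inner `for j in range(start, alen): sum += a[j]; if sum % 2 == 0: end = j; break`
-- (traversed as structural recursion over the same elements, with j the running index)
def innerA : List Int → Int → Nat → Option Nat
  | [], _, _ => none
  | x :: xs, sum, j =>
    if (sum + x) % 2 = 0 then some j else innerA xs (sum + x) (j + 1)

-- outer `while not found` loop; Python tests `start == alen`, written `alen ≤ start` here
-- (start increments by 1 from 0 and so never exceeds alen; needed only for termination)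
def outerA (a : List Int) (start : Nat) : Option (Nat × Nat) :=
  if _h : a.length ≤ start then none
  else
    match innerA (a.drop start) 0 start with
    | some e => some (start, e)
    | none => outerA a (start + 1)
  termination_by a.length - start
  decreasing_by omega

def find (a : List Int) : Int × List Int :=
  match outerA a 0 with
  | none => (-1, [])
  | some (s, e) =>
    -- ak = [p+1 for p in range(start, end+1)]
    let ak := (List.range' s (e + 1 - s)).map (fun p => Int.ofNat p + 1)
    ((ak.length : Int), ak)

-- ===== PORT B =====
-- `for k in range(1, n): if a[k] % 2 != 0: return ...` as recursion over the tail with counter k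
def firstOddIdx : List Int → Nat → Option Nat
  | [], _ => none
  | x :: xs, k => if x % 2 ≠ 0 then some k else firstOddIdx xs (k + 1)

def find_alt (a : List Int) : Int × List Int :=
  match a with
  | [] => (-1, [])
  | x :: rest =>
    if x % 2 = 0 then (1, [1])
    else
      match firstOddIdx rest 1 with
      | some k => ((k : Int) + 1, (List.range' 1 (k + 1)).map (fun p => Int.ofNat p))
      | none => if rest.length > 0 then (1, [2]) else (-1, [])

-- ===== PRECONDITION & SPEC =====
def Spec_find (a : List Int) (out : Int × List Int) : Prop := out = find_alt a
instance (a : List Int) (out : Int × List Int) : Decidable (Spec_find a out) := by unfold Spec_find; infer_instance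

-- ===== CLAIM (what is proved, stated in full; the proofs are below) =====
def Claim_equal_find : Prop := ∀ (a : List Int), Dom_find a → Spec_find a (find a)

-- ===== LEMMAS AND PROOFS =====

-- while the running sum is odd, the inner loop's sum turns even exactly at the next odd element
theorem innerA_eq_firstOdd (l : List Int) : ∀ (sum : Int) (j : Nat), sum % 2 ≠ 0 →
    innerA l sum j = firstOddIdx l j := by
  induction l with
  | nil => intro sum j h; rfl
  | cons x xs ih =>
    intro sum j h
    simp only [innerA, firstOddIdx]
    by_cases hx : x % 2 ≠ 0
    · have : (sum + x) % 2 = 0 := by omega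
      simp [this, hx]
    · have : (sum + x) % 2 ≠ 0 := by omega
      simp [this, hx, ih _ _ this]

theorem mapShift (n : Nat) : ∀ (s : Nat),
    (List.range' s n).map (fun p => Int.ofNat p + 1) = (List.range' (s + 1) n).map (fun p => Int.ofNat p) := by
  induction n with
  | zero => intro s; rfl
  | succ n ih =>
    intro s
    rw [List.range'_succ, List.range'_succ, List.map_cons, List.map_cons, ih]
    norm_num

theorem find_spec_aux (a : List Int) : find a = find_alt a := by
  match a with
  | [] =>
    rw [find, outerA]
    rfl
  | x :: rest =>
    by_cases hx : x % 2 = 0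
    · -- first element even: inner loop stops at j = 0 immediately
      rw [find, outerA]
      simp only [List.length_cons, Nat.le_zero, List.drop_zero, innerA, Int.zero_add, hx]
      simp [find_alt, hx, List.range']
    · -- first element odd
      have h0 : (0 + x) % 2 ≠ 0 := by omega
      rw [find, outerA]
      simp only [show ¬((x :: rest).length ≤ 0) by simp, List.drop_zero, innerA, if_neg h0]
      rw [innerA_eq_firstOdd rest (0 + x) 1 h0]
      match hfo : firstOddIdx rest 1 with
      | some k =>
        have hm := mapShift (k + 1) 0
        simp only [find_alt, hx, hfo, show k + 1 - 0 = k + 1 from rfl, hm]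
        simpa using hm
      | none =>
        -- no second odd: start becomes 1
        rw [outerA]
        match rest with
        | [] => simp [find_alt, hx, firstOddIdx]
        | y :: ys =>
          have hy : y % 2 = 0 := by
            by_contra hy
            simp [firstOddIdx, hy] at hfo
          rw [dif_neg (show ¬((x :: y :: ys).length ≤ 1) by simp)]
          rw [show List.drop 1 (x :: y :: ys) = y :: ys from rfl,
            show innerA (y :: ys) 0 1 = some 1 from by
              simp only [innerA]; rw [if_pos (show (0 + y) % 2 = 0 by omega)]]
          simp [find_alt, hx, hfo, List.range']

-- ===== VERDICT (by name: the statement is the Claim_ definition above) =====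
theorem find_spec : Claim_equal_find := by
  intro a _
  unfold Spec_find
  exact find_spec_aux a
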